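-- pv_equiv track=rewrite | github.com/ArunGiri392/FamousCodingInterviewQuestions | missingnumber.py | flip_the_numbers
-- ===== SOURCE A (Python) =====
-- def flip_the_numbers(nums,threshold):
--     start = 0
--     end = len(nums)-1
--     while start <= end:
--         if nums[start] < threshold and nums[end] < threshold:
--             temp = nums[start]
--             nums[start] = nums[end]
--             nums[end] = temp
--             start += 1
--             end -= 1
--         elif nums[start] >= threshold:
--             start += 1
--         elif nums[end] >= threshold:
--             end -= 1
--     return nums
-- ===== SOURCE B (Python) =====
-- def flip_the_numbers(nums, threshold):
--     rvals = [x for x in nums if x < threshold]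
--     rvals.reverse()
--     it = iter(rvals)
--     for i in range(len(nums)):
--         if nums[i] < threshold:
--             nums[i] = next(it)
--     return nums
-- ===== Notes on version B (the rewrite author's own statement) =====
-- stated objective: simpler
-- what changed: Replaced the conditional two-pointer inward swap by a gather/reverse/scatter pass: collect the sub-threshold values, reverse them, then walk the list once writing them back into the sub-threshold slots.
import Mathlib
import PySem

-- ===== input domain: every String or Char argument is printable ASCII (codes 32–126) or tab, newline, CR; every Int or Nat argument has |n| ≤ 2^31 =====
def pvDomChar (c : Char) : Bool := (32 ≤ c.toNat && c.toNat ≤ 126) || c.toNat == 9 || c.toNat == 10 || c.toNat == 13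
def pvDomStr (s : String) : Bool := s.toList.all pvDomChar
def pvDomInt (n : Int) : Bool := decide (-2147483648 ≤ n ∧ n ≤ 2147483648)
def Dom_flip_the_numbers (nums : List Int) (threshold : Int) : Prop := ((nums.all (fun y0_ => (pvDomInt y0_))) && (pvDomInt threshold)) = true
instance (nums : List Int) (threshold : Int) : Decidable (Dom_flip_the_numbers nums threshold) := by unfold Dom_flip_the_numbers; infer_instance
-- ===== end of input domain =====

-- B replaces A's two-pointer inward swapping by a gather/reverse/scatter pass (simpler); A mutates
-- its argument in place and B performs the same mutation in Python; the equivalence proved here is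
-- about the return value.

-- ===== PORT A =====
-- the while loop of A; indices are always in range when the body runs from the top-level call
-- (s ≤ e, 0 ≤ s, e < len), so the total pyGetD/pySetD forms are exact here.
def flipLoop (threshold : Int) (nums : List Int) (s e : Int) : List Int :=
  if h : s ≤ e then
    if PySem.List.pyGetD nums s 0 < threshold ∧ PySem.List.pyGetD nums e 0 < threshold then
      flipLoop threshold
        (PySem.List.pySetD (PySem.List.pySetD nums s (PySem.List.pyGetD nums e 0)) e
          (PySem.List.pyGetD nums s 0)) (s + 1) (e - 1)
    else if PySem.List.pyGetD nums s 0 ≥ threshold then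
      flipLoop threshold nums (s + 1) e
    else
      -- here nums[e] ≥ threshold provably holds, so Python's third elif fires
      flipLoop threshold nums s (e - 1)
  else nums
termination_by (e + 1 - s).toNat
decreasing_by all_goals omega

def flip_the_numbers (nums : List Int) (threshold : Int) : List Int :=
  flipLoop threshold nums 0 (nums.length - 1)

-- ===== PORT B =====
-- the for loop of Source B: walk nums, replacing each sub-threshold element by next(it)
-- the iterator never runs dry in Source B (one value was gathered per sub-threshold element), so
-- the empty-rvals branch is unreachable from flip_the_numbers_alt.
def altGo (threshold : Int) : List Int → List Int → List Int
  | [], _ => []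
  | x :: xs, rvals =>
    if x < threshold then
      match rvals with
      | v :: r => v :: altGo threshold xs r
      | [] => x :: altGo threshold xs []
    else x :: altGo threshold xs rvals

def flip_the_numbers_alt (nums : List Int) (threshold : Int) : List Int :=
  altGo threshold nums ((nums.filter (fun x => x < threshold)).reverse)

-- ===== PRECONDITION & SPEC =====
def Spec_flip_the_numbers (nums : List Int) (threshold : Int) (out : List Int) : Prop := out = flip_the_numbers_alt nums threshold
instance (nums : List Int) (threshold : Int) (out : List Int) : Decidable (Spec_flip_the_numbers nums threshold out) := by unfold Spec_flip_the_numbers; infer_instance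

-- ===== CLAIM (what is proved, stated in full; the proofs are below) =====
def Claim_equal_flip_the_numbers : Prop := ∀ (nums : List Int) (threshold : Int), Dom_flip_the_numbers nums threshold → Spec_flip_the_numbers nums threshold (flip_the_numbers nums threshold)

-- ===== LEMMAS AND PROOFS =====

-- the common value of both programs: reverse the sub-threshold values of a segment in place
def flipSeg (t : Int) : List Int → List Int
  | [] => []
  | [x] => [x]
  | x :: y :: ys =>
    if x < t ∧ (y :: ys).getLastD 0 < t then
      ((y :: ys).getLastD 0) :: flipSeg t (y :: ys).dropLast ++ [x]
    else if x ≥ t then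
      x :: flipSeg t (y :: ys)
    else
      flipSeg t (x :: (y :: ys).dropLast) ++ [(y :: ys).getLastD 0]
termination_by l => l.length
decreasing_by all_goals simp

lemma flipSeg_cons_concat (t x z : Int) (m : List Int) :
    flipSeg t (x :: m ++ [z]) =
      if x < t ∧ z < t then z :: flipSeg t m ++ [x]
      else if x ≥ t then x :: flipSeg t (m ++ [z])
      else flipSeg t (x :: m) ++ [z] := by
  cases m with
  | nil => simp [flipSeg]
  | cons a m' =>
    have hl : (a :: (m' ++ [z])).getLastD 0 = z := by
      rw [← List.cons_append, List.getLastD_concat]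
    have hd : (a :: (m' ++ [z])).dropLast = a :: m' := by
      rw [← List.cons_append]
      exact List.dropLast_concat ..
    simp only [List.cons_append, flipSeg, hl, hd]

lemma getD_append_length (pre : List Int) (x : Int) (rest : List Int) :
    (pre ++ x :: rest).getD pre.length 0 = x := by
  simp [List.getD]

lemma set_append_length (pre : List Int) (x v : Int) (rest : List Int) :
    (pre ++ x :: rest).set pre.length v = pre ++ v :: rest := by
  induction pre with
  | nil => simp
  | cons p ps ih => simp [ih]

lemma pyGetD_append_len (pre : List Int) (x : Int) (rest : List Int) :
    PySem.List.pyGetD (pre ++ x :: rest) (pre.length : Int) 0 = x := by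
  simpa using getD_append_length pre x rest

lemma pySetD_append_len (pre : List Int) (x v : Int) (rest : List Int) :
    PySem.List.pySetD (pre ++ x :: rest) (pre.length : Int) v = pre ++ v :: rest := by
  simpa using set_append_length pre x v rest

lemma flipLoop_seg (t : Int) :
    ∀ (n : Nat) (mid pre suf : List Int), mid.length ≤ n →
      flipLoop t (pre ++ mid ++ suf) (pre.length : Int) ((pre.length : Int) + mid.length - 1) =
        pre ++ flipSeg t mid ++ suf := by
  intro n
  induction n with
  | zero =>
    intro mid pre suf h
    have hm : mid = [] := by cases mid <;> simp_all
    subst hm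
    rw [flipLoop, dif_neg (by simp)]
    simp [flipSeg]
  | succ n ih =>
    intro mid pre suf h
    match mid, h with
    | [], _ =>
      rw [flipLoop, dif_neg (by simp)]
      simp [flipSeg]
    | [x], _ =>
      have he : (pre.length : Int) + (([x] : List Int).length : Int) - 1 = (pre.length : Int) := by
        simp
      have hA : pre ++ [x] ++ suf = pre ++ x :: suf := by simp
      rw [he, hA, flipLoop, dif_pos le_rfl, pyGetD_append_len pre x suf]
      by_cases hx : x < t
      · rw [if_pos ⟨hx, hx⟩, pySetD_append_len, pySetD_append_len]
        rw [flipLoop, dif_neg (by omega)]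
        simp [flipSeg]
      · rw [if_neg (by tauto), if_pos (by omega)]
        rw [flipLoop, dif_neg (by omega)]
        simp [flipSeg]
    | x :: y :: ys, h =>
      obtain ⟨m, z, hmz⟩ : ∃ m z, y :: ys = m ++ [z] :=
        ⟨_, _, (List.dropLast_append_getLast (l := y :: ys) (by simp)).symm⟩
      have hml : m.length = ys.length := by
        have := congrArg List.length hmz; simp at this; omega
      have hlen : ys.length + 2 ≤ n + 1 := by simpa using h
      rw [hmz]
      have he : (pre.length : Int) + ((x :: (m ++ [z])).length : Int) - 1
          = ((pre ++ x :: m).length : Int) := by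
        simp only [List.length_append, List.length_cons, List.length_nil]; push_cast; omega
      rw [he, flipLoop, dif_pos (by simp only [List.length_append, List.length_cons, List.length_nil]; push_cast; omega)]
      have hA1 : pre ++ (x :: (m ++ [z])) ++ suf = pre ++ x :: ((m ++ [z]) ++ suf) := by simp
      have hA2 : pre ++ (x :: (m ++ [z])) ++ suf = (pre ++ x :: m) ++ z :: suf := by simp
      have hgs := pyGetD_append_len pre x ((m ++ [z]) ++ suf)
      rw [← hA1] at hgs
      have hge := pyGetD_append_len (pre ++ x :: m) z suf
      rw [← hA2] at hge
      rw [hgs, hge]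
      by_cases hx : x < t
      · by_cases hz : z < t
        · rw [if_pos ⟨hx, hz⟩]
          have hset1 := pySetD_append_len pre x z ((m ++ [z]) ++ suf)
          rw [← hA1] at hset1
          rw [hset1]
          have hB : pre ++ z :: ((m ++ [z]) ++ suf) = (pre ++ z :: m) ++ z :: suf := by simp
          have hlen2 : ((pre ++ x :: m).length : Int) = ((pre ++ z :: m).length : Int) := by simp
          rw [hB, hlen2, pySetD_append_len (pre ++ z :: m) z x suf]
          have e1 : (pre ++ z :: m) ++ x :: suf = (pre ++ [z]) ++ m ++ (x :: suf) := by simp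
          have e2 : (pre.length : Int) + 1 = (((pre ++ [z]).length : Nat) : Int) := by simp
          have e3 : ((pre ++ z :: m).length : Int) - 1
              = (((pre ++ [z]).length : Nat) : Int) + (m.length : Int) - 1 := by
            simp only [List.length_append, List.length_cons, List.length_nil]; push_cast; omega
          rw [e1, e2, e3, ih m (pre ++ [z]) (x :: suf) (by omega)]
          rw [← List.cons_append, flipSeg_cons_concat, if_pos ⟨hx, hz⟩]
          simp
        · rw [if_neg (by tauto), if_neg (by omega)]
          have e1 : pre ++ (x :: (m ++ [z])) ++ suf = pre ++ (x :: m) ++ z :: suf := by simp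
          have e3 : ((pre ++ x :: m).length : Int) - 1
              = (pre.length : Int) + ((x :: m).length : Int) - 1 := by
            simp only [List.length_append, List.length_cons, List.length_nil]; push_cast; omega
          rw [e1, e3, ih (x :: m) pre (z :: suf) (by simp; omega)]
          rw [← List.cons_append, flipSeg_cons_concat, if_neg (by tauto), if_neg (by omega)]
          simp
      · rw [if_neg (by tauto), if_pos (by omega)]
        have e1 : pre ++ (x :: (m ++ [z])) ++ suf = (pre ++ [x]) ++ (m ++ [z]) ++ suf := by simp
        have e2 : (pre.length : Int) + 1 = (((pre ++ [x]).length : Nat) : Int) := by simp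
        have e3 : ((pre ++ x :: m).length : Int)
            = (((pre ++ [x]).length : Nat) : Int) + ((m ++ [z]).length : Int) - 1 := by
          simp only [List.length_append, List.length_cons, List.length_nil]; push_cast; omega
        rw [e1, e2, e3, ih (m ++ [z]) (pre ++ [x]) suf (by simp; omega)]
        rw [← List.cons_append, flipSeg_cons_concat, if_neg (by tauto), if_pos (by omega)]
        simp

lemma altGo_append (t : Int) (zs : List Int) :
    ∀ (ys r : List Int), ys.countP (fun x => decide (x < t)) ≤ r.length →
      altGo t (ys ++ zs) r =
        altGo t ys (r.take (ys.countP (fun x => decide (x < t)))) ++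
          altGo t zs (r.drop (ys.countP (fun x => decide (x < t)))) := by
  intro ys
  induction ys with
  | nil => intro r h; simp [altGo]
  | cons x xs ih =>
    intro r h
    by_cases hx : x < t
    · simp only [List.countP_cons, hx, decide_true, if_pos] at h ⊢
      obtain ⟨v, r', rfl⟩ : ∃ v r', r = v :: r' := by
        cases r with
        | nil => simp at h
        | cons v r' => exact ⟨v, r', rfl⟩
      simp only [List.cons_append, altGo, if_pos hx, List.take_succ_cons, List.drop_succ_cons]
      rw [ih r' (by simp only [List.length_cons] at h; omega)]
    · simp only [List.countP_cons, hx, decide_false] at h ⊢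
      simp only [List.cons_append, altGo, if_neg hx]
      rw [ih r (by omega)]
      simp

lemma altGo_flipSeg (t : Int) :
    ∀ (n : Nat) (l : List Int), l.length ≤ n →
      altGo t l ((l.filter (fun x => x < t)).reverse) = flipSeg t l := by
  intro n
  induction n with
  | zero =>
    intro l h
    have : l = [] := by cases l <;> simp_all
    subst this; simp [altGo, flipSeg]
  | succ n ih =>
    intro l h
    match l, h with
    | [], _ => simp [altGo, flipSeg]
    | [x], _ => by_cases hx : x < t <;> simp [altGo, flipSeg, hx]
    | x :: y :: ys, h =>
      obtain ⟨m, z, hmz⟩ : ∃ m z, y :: ys = m ++ [z] :=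
        ⟨_, _, (List.dropLast_append_getLast (l := y :: ys) (by simp)).symm⟩
      have hml : m.length = ys.length := by
        have := congrArg List.length hmz; simp at this; omega
      have hlen : ys.length + 2 ≤ n + 1 := by simpa using h
      rw [hmz, ← List.cons_append, flipSeg_cons_concat]
      have hrev : ∀ L : List Int, ((L.filter (fun x => x < t)).reverse).length
          = L.countP (fun x => decide (x < t)) := by
        intro L; simp [← List.countP_eq_length_filter]
      by_cases hx : x < t
      · by_cases hz : z < t
        · simp only [hx, hz, and_self, if_pos]
          have hfil : ((x :: (m ++ [z])).filter (fun x => x < t)).reverse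
              = z :: (((m.filter (fun x => x < t)).reverse) ++ [x]) := by
            simp [List.filter_append, hx, hz]
          rw [List.cons_append, hfil]
          simp only [altGo, if_pos hx]
          rw [altGo_append t [z] m _ (by simp [hrev])]
          rw [List.take_left' (hrev m), List.drop_left' (hrev m)]
          rw [ih m (by omega)]
          simp [altGo, hz]
        · have hxt : ¬ (x < t ∧ z < t) := by tauto
          have h2 : ¬ x ≥ t := by omega
          rw [if_neg hxt, if_neg h2]
          have hfil : (((x :: m) ++ [z]).filter (fun x => x < t)).reverse
              = ((x :: m).filter (fun x => x < t)).reverse := by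
            simp [List.filter_append, hx, hz]
          rw [hfil, altGo_append t [z] (x :: m) _ (hrev _).ge]
          rw [List.take_of_length_le (le_of_eq (hrev _)),
              List.drop_of_length_le (le_of_eq (hrev _))]
          rw [ih (x :: m) (by simp; omega)]
          simp [altGo, hz]
      · have hxt : ¬ (x < t ∧ z < t) := by tauto
        have h2 : x ≥ t := by omega
        rw [if_neg hxt, if_pos h2]
        have hfil : ((x :: (m ++ [z])).filter (fun x => x < t)).reverse
            = ((m ++ [z]).filter (fun x => x < t)).reverse := by
          simp [hx]
        rw [List.cons_append, hfil]
        simp only [altGo, if_neg hx]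
        rw [ih (m ++ [z]) (by simp; omega)]

-- ===== VERDICT (by name: the statement is the Claim_ definition above) =====
theorem flip_the_numbers_spec : Claim_equal_flip_the_numbers := by
  intro nums t _
  unfold Spec_flip_the_numbers flip_the_numbers flip_the_numbers_alt
  have h1 := flipLoop_seg t nums.length nums [] [] (le_refl _)
  have h2 := altGo_flipSeg t nums.length nums (le_refl _)
  simp at h1
  rw [h1, ← h2]
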